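-- pv_equiv track=rewrite | github.com/ilhammramadhan/leetcode | 3623-count-number-of-trapezoids-i/3623-count-number-of-trapezoids-i.py | countTrapezoids
-- ===== SOURCE A (Python) =====
-- from typing import List
-- from collections import Counter
--
-- def countTrapezoids(points: List[List[int]]) -> int:
--     # 1. Group points by their y-coordinate
--     # We use a Counter to count how many points share the same y-value.
--     # Key = y-coordinate, Value = number of points at that y.
--     y_counts = Counter()
--     for x, y in points:
--         y_counts[y] += 1
--
--     # 2. Calculate the number of ways to form a horizontal line (a pair of points)
--     # for each unique y-coordinate.
--     # If a row has 'k' points, we can choose 2 points in k*(k-1)/2 ways.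
--     ways_per_row = []
--     for count in y_counts.values():
--         if count >= 2:
--             num_pairs = count * (count - 1) // 2
--             ways_per_row.append(num_pairs)
--
--     # If we don't have at least two rows with pairs, we can't form a trapezoid.
--     if len(ways_per_row) < 2:
--         return 0
--
--     # 3. Calculate the sum of products of all pairs of rows efficiently.
--     # We need: sum(ways[i] * ways[j]) for all i < j
--     # Formula: Result = ((Sum of all ways)^2 - (Sum of each way squared)) / 2
--
--     MOD = 10**9 + 7
--
--     total_sum = sum(ways_per_row)
--     sum_of_squares = sum(w * w for w in ways_per_row)
--
--     # Calculate result using integer division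
--     result = (total_sum * total_sum - sum_of_squares) // 2
--
--     return result % MOD
-- ===== SOURCE B (Python) =====
-- def countTrapezoids(points):
--     counts = {}
--     for p in points:
--         x, y = p
--         counts[y] = counts.get(y, 0) + 1
--     result = 0
--     running = 0
--     for k in counts.values():
--         if k >= 2:
--             w = k * (k - 1) // 2
--             result += w * running
--             running += w
--     return result % (10**9 + 7)
-- ===== Notes on version B (the rewrite author's own statement) =====
-- stated objective: simpler
-- what changed: Replaces A's three-pass aggregation (build ways list, sum it, sum its squares, then the closed form (S^2 - SSQ)//2 with an explicit len<2 guard) by a single accumulating pass over the per-row counts that keeps a running sum and adds w*running for each qualifying row; the guard disappears because the pair-product sum is 0 with fewer than two rows.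
import Mathlib
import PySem

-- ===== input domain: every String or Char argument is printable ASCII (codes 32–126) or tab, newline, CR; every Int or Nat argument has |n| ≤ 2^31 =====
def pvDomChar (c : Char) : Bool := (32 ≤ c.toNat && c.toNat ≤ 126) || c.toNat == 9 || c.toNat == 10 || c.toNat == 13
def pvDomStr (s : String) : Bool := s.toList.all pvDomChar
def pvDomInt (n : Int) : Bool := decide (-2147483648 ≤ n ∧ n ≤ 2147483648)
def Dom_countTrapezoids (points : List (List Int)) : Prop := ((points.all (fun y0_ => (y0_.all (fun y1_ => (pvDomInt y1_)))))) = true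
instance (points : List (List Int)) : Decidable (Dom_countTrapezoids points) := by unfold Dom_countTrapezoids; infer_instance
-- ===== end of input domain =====

-- B replaces A's three-pass aggregation plus closed form (S^2 - SSQ)//2 (and its len<2 guard)
-- by a single accumulating pass computing the pairwise-product sum directly; same results (objective: simpler).


-- ===== PORT A =====
def countTrapezoids (points : List (List Int)) : Int :=
  let y_counts : PySem.Dict Int Int := points.foldl (fun d p =>
    match p with
    | [_, y] => d.insert y (d.getD y 0 + 1)
    | _ => d) PySem.Dict.empty
  let ways_per_row : List Int := y_counts.values.foldl (fun acc count =>
    if count ≥ 2 then acc ++ [PySem.Int.floordiv (count * (count - 1)) 2] else acc) []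
  if ways_per_row.length < 2 then 0
  else
    let MOD : Int := 10 ^ 9 + 7
    let total_sum : Int := ways_per_row.foldl (· + ·) 0
    let sum_of_squares : Int := ways_per_row.foldl (fun a w => a + w * w) 0
    let result : Int := PySem.Int.floordiv (total_sum * total_sum - sum_of_squares) 2
    PySem.Int.mod result MOD

-- ===== PORT B =====
-- B's loop body: one accumulating step per row count
def altStep (st : Int × Int) (k : Int) : Int × Int :=
  if k ≥ 2 then
    let w := PySem.Int.floordiv (k * (k - 1)) 2
    (st.1 + w * st.2, st.2 + w)
  else st

def countTrapezoids_alt (points : List (List Int)) : Int :=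
  -- 'x, y = p': y is p[1]; rows of other lengths raise in Python and are excluded by Pre_
  let counts : PySem.Dict Int Int := points.foldl (fun d p =>
    (p[1]?).elim d (fun y => d.insert y (d.getD y 0 + 1))) PySem.Dict.empty
  let st : Int × Int := counts.values.foldl altStep (0, 0)
  PySem.Int.mod st.1 (10 ^ 9 + 7)

-- ===== PRECONDITION & SPEC =====
-- Pre_ excludes rows not of length exactly 2, on which the unpacking 'x, y = …' raises ValueError in A (and in B).
def Pre_countTrapezoids (points : List (List Int)) : Prop := ∀ p ∈ points, p.length = 2
instance (points : List (List Int)) : Decidable (Pre_countTrapezoids points) := by unfold Pre_countTrapezoids; infer_instance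
def pvWitness_countTrapezoids : List (List Int) := [[0, 0], [1, 0], [0, 1], [1, 1]]

def Spec_countTrapezoids (points : List (List Int)) (out : Int) : Prop := out = countTrapezoids_alt points
instance (points : List (List Int)) (out : Int) : Decidable (Spec_countTrapezoids points out) := by unfold Spec_countTrapezoids; infer_instance

-- ===== CLAIM (what is proved, stated in full; the proofs are below) =====
def Claim_equal_countTrapezoids : Prop := ∀ (points : List (List Int)), Dom_countTrapezoids points → Pre_countTrapezoids points → Spec_countTrapezoids points (countTrapezoids points)

-- ===== LEMMAS AND PROOFS =====

-- B's accumulating step, on an already-computed pair count w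
def stepW (st : Int × Int) (w : Int) : Int × Int := (st.1 + w * st.2, st.2 + w)

def pairSum (ws : List Int) : Int := (ws.foldl stepW (0, 0)).1

def fdiv2 (k : Int) : Int := PySem.Int.floordiv (k * (k - 1)) 2

lemma foldW_eq (ws : List Int) (r run : Int) :
    ws.foldl stepW (r, run) = (r + run * ws.sum + pairSum ws, run + ws.sum) := by
  induction ws generalizing r run with
  | nil => simp [pairSum]
  | cons w t ih =>
    have hp : pairSum (w :: t) = w * t.sum + pairSum t := by
      simp only [pairSum, List.foldl_cons, stepW]
      rw [ih]
      simp only [pairSum]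
      ring
    simp only [List.foldl_cons, stepW, hp, List.sum_cons]
    rw [ih]
    simp only [Prod.mk.injEq]
    constructor <;> ring

lemma pairSum_cons (w : Int) (t : List Int) : pairSum (w :: t) = w * t.sum + pairSum t := by
  simp only [pairSum, List.foldl_cons, stepW]
  rw [foldW_eq]
  simp only [pairSum]
  ring

lemma two_pairSum (ws : List Int) :
    2 * pairSum ws = ws.sum * ws.sum - (ws.map (fun w => w * w)).sum := by
  induction ws with
  | nil => simp [pairSum]
  | cons w t ih =>
    simp only [pairSum_cons, List.sum_cons, List.map_cons]
    linear_combination ih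

-- the filtered/mapped list of per-row pair counts
lemma ways_eq_filter (cs : List Int) (acc : List Int) :
    cs.foldl (fun acc count =>
      if count ≥ 2 then acc ++ [PySem.Int.floordiv (count * (count - 1)) 2] else acc) acc
    = acc ++ (cs.filter (fun k => decide (k ≥ 2))).map fdiv2 := by
  induction cs generalizing acc with
  | nil => simp
  | cons c t ih =>
    rw [List.foldl_cons]
    by_cases h : c ≥ 2
    · rw [if_pos h, List.filter_cons_of_pos (by simpa using h), List.map_cons, ih]
      simp [fdiv2]
    · rw [if_neg h, List.filter_cons_of_neg (by simpa using h), ih]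

lemma altStep_fold_eq_filter (cs : List Int) :
    cs.foldl altStep (0, 0)
    = ((cs.filter (fun k => decide (k ≥ 2))).map fdiv2).foldl stepW (0, 0) := by
  have key : ∀ st : Int × Int, cs.foldl altStep st
      = ((cs.filter (fun k => decide (k ≥ 2))).map fdiv2).foldl stepW st := by
    induction cs with
    | nil => intro st; rfl
    | cons c t ih =>
      intro st
      rw [List.foldl_cons]
      by_cases h : c ≥ 2
      · rw [List.filter_cons_of_pos (by simpa using h), List.map_cons, List.foldl_cons,
          show altStep st c = stepW st (fdiv2 c) from by simp [altStep, stepW, fdiv2, h]]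
        exact ih _
      · rw [List.filter_cons_of_neg (by simpa using h),
          show altStep st c = st from by simp [altStep, h]]
        exact ih _
  exact key (0, 0)

-- the common aggregation equality, over an arbitrary list of counts
lemma agg_eq (cs : List Int) :
    (let ways_per_row : List Int := cs.foldl (fun acc count =>
      if count ≥ 2 then acc ++ [PySem.Int.floordiv (count * (count - 1)) 2] else acc) []
    if ways_per_row.length < 2 then (0 : Int)
    else
      let MOD : Int := 10 ^ 9 + 7
      let total_sum : Int := ways_per_row.foldl (· + ·) 0
      let sum_of_squares : Int := ways_per_row.foldl (fun a w => a + w * w) 0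
      let result : Int := PySem.Int.floordiv (total_sum * total_sum - sum_of_squares) 2
      PySem.Int.mod result MOD)
    = (let st : Int × Int := cs.foldl altStep (0, 0)
      PySem.Int.mod st.1 (10 ^ 9 + 7)) := by
  simp only [ways_eq_filter, altStep_fold_eq_filter, List.nil_append, foldW_eq]
  set ws := (cs.filter (fun k => decide (k ≥ 2))).map fdiv2 with hws
  have htot : ws.foldl (· + ·) (0 : Int) = ws.sum := by
    simpa using PySem.List.foldl_add (l := ws) (g := fun w => w) (a := 0)
  have hsq : ws.foldl (fun a w => a + w * w) (0 : Int) = (ws.map (fun w => w * w)).sum := by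
    simpa using PySem.List.foldl_add (l := ws) (g := fun w => w * w) (a := 0)
  have hkey : (0 : Int) + 0 * ws.sum + pairSum ws
      = PySem.Int.floordiv (ws.sum * ws.sum - (ws.map (fun w => w * w)).sum) 2 := by
    rw [← two_pairSum, PySem.Int.floordiv_eq_ediv_of_pos (by norm_num)]
    omega
  by_cases h : ws.length < 2
  · have h0 : pairSum ws = 0 := by
      match ws, h with
      | [], _ => simp [pairSum]
      | [w], _ => simp [pairSum, stepW]
    simp [h, h0, PySem.Int.mod]
  · rw [if_neg h, htot, hsq, hkey]

-- ===== VERDICT (by name: the statement is the Claim_ definition above) =====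
theorem countTrapezoids_spec : Claim_equal_countTrapezoids := by
  intro points _ hpre
  show countTrapezoids points = countTrapezoids_alt points
  unfold countTrapezoids countTrapezoids_alt
  have hd : (points.foldl (fun (d : PySem.Dict Int Int) p =>
      match p with
      | [_, y] => d.insert y (d.getD y 0 + 1)
      | _ => d) PySem.Dict.empty)
    = points.foldl (fun (d : PySem.Dict Int Int) (p : List Int) =>
        (p[1]?).elim d (fun y => d.insert y (d.getD y 0 + 1))) PySem.Dict.empty := by
    apply PySem.List.foldl_congr_mem
    intro acc p hp
    have h2 := hpre p hp
    rcases p with _ | ⟨x, _ | ⟨y, _ | ⟨z, t⟩⟩⟩ <;> simp_all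
  rw [← hd]
  exact agg_eq _
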